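-- pv_equiv track=rewrite | github.com/pc5401/my_BOJ | 백준/Gold/21820. Acowdemia I/Acowdemia I.py | solve
-- ===== SOURCE A (Python) =====
-- def solve(N: int, L: int, citations: list[int]) -> int:
--     freq = [0] * (N + 1)
--     for c in citations:
--         freq[c if c <= N else N] += 1
--
--     suf = [0] * (N + 2)
--     for h in range(N, -1, -1):
--         suf[h] = suf[h+1] + freq[h]
--
--     def can(h: int) -> bool:
--         k = suf[h]
--         if k >= h:
--             return True
--         need = h - k
--         t = freq[h-1] if h >= 1 else 0
--         return need <= L and need <= t
--
--     lo, hi = 0, N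
--     while lo < hi:
--         mid = (lo + hi + 1) // 2
--         if can(mid):
--             lo = mid
--         else:
--             hi = mid - 1
--     return lo
-- ===== SOURCE B (Python) =====
-- from collections import Counter
--
-- def solve(N: int, L: int, citations: list[int]) -> int:
--     # Count citations clamped at N, then scan h from N down: the feasibility
--     # predicate is monotone, so the first feasible h is the answer.
--     cnt = Counter(c if c <= N else N for c in citations)
--     suf = 0
--     for h in range(N, 0, -1):
--         suf += cnt[h]
--         if suf >= h or (h - suf <= L and h - suf <= cnt[h - 1]):
--             return h
--     return 0
-- ===== Notes on version B (the rewrite author's own statement) =====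
-- stated objective: simpler
-- what changed: Replaces the hand-built frequency/suffix arrays and the binary search by a Counter plus a single top-down linear scan that returns the first feasible h (valid because the feasibility predicate is monotone).
-- outside the precondition, e.g. on solve(2, 1, [-1]): A returns 1, B returns 0; on solve(-1, 0, [0]): A raises IndexError, B returns 0
import Mathlib
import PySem

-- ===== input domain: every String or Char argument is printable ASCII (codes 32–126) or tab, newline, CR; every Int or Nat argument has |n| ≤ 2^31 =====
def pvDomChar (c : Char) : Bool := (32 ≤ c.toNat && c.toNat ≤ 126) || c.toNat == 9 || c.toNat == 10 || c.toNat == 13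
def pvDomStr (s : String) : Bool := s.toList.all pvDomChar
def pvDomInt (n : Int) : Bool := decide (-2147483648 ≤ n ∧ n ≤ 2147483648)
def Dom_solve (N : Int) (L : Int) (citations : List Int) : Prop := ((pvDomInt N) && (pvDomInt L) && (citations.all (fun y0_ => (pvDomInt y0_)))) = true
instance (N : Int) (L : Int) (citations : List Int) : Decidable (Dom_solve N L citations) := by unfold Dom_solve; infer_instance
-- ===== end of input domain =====

-- B replaces A's hand-built frequency/suffix arrays and binary search by a Counter
-- and a single top-down linear scan (first feasible h); proved equal on Pre_solve.

-- ===== PORT A =====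
-- Python list indexing/assignment, hand-ported for an Array (PySem's list
-- primitives are O(n) per update): exact where Python returns — a negative
-- index wraps by the length; where Python would raise IndexError the value is
-- unchanged / 0 (those inputs are excluded by Pre_solve).
def pvAGet (arr : Array Int) (i : Int) : Int :=
  let j := if i < 0 then i + (arr.size : Int) else i
  if h : 0 ≤ j ∧ j.toNat < arr.size then arr[j.toNat] else 0

def pvASet (arr : Array Int) (i : Int) (v : Int) : Array Int :=
  let j := if i < 0 then i + (arr.size : Int) else i
  if h : 0 ≤ j ∧ j.toNat < arr.size then arr.set j.toNat v else arr

-- the while-loop of A's binary search; the fuel argument only makes the same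
-- computation total (hi - lo shrinks each turn, so (hi - lo).toNat + 1 suffices)
def pvBsearch (can : Int → Bool) : Nat → Int → Int → Int
  | 0, lo, _ => lo
  | fuel + 1, lo, hi =>
    if lo < hi then
      let mid := PySem.Int.floordiv (lo + hi + 1) 2
      if can mid then pvBsearch can fuel mid hi else pvBsearch can fuel lo (mid - 1)
    else lo

def solve (N : Int) (L : Int) (citations : List Int) : Int :=
  let freq := citations.foldl (fun freq c =>
      let i := if c ≤ N then c else N
      pvASet freq i (pvAGet freq i + 1))
    (Array.replicate (N + 1).toNat (0 : Int))
  let suf := (PySem.List.pyRange N (-1) (-1)).foldl (fun suf h =>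
      pvASet suf h (pvAGet suf (h + 1) + pvAGet freq h))
    (Array.replicate (N + 2).toNat (0 : Int))
  let can : Int → Bool := fun h =>
    let k := pvAGet suf h
    if k ≥ h then true
    else
      let need := h - k
      let t := if h ≥ 1 then pvAGet freq (h - 1) else 0
      decide (need ≤ L ∧ need ≤ t)
  pvBsearch can ((N - 0).toNat + 1) 0 N

-- ===== PORT B =====
-- the for-loop of B with early return, as recursion on the range list
def pvScan (L : Int) (cnt : PySem.Dict Int Int) : List Int → Int → Int
  | [], _ => 0
  | h :: rest, suf =>
    let suf' := suf + cnt.getD h 0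
    if suf' ≥ h ∨ (h - suf' ≤ L ∧ h - suf' ≤ cnt.getD (h - 1) 0) then h
    else pvScan L cnt rest suf'

def solve_alt (N : Int) (L : Int) (citations : List Int) : Int :=
  let cnt := PySem.Dict.counter (citations.map (fun c => if c ≤ N then c else N))
  pvScan L cnt (PySem.List.pyRange N 0 (-1)) 0

-- ===== PRECONDITION & SPEC =====
-- Pre_ excludes inputs on which A raises IndexError (N < 0 with nonempty citations,
-- or a citation below -(N+1)) and inputs with a negative citation count, where A's
-- returned value comes from accidental negative-index wraparound into freq.
def Pre_solve (N : Int) (L : Int) (citations : List Int) : Prop :=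
  (0 ≤ N ∨ citations = []) ∧ ∀ c ∈ citations, 0 ≤ c
instance (N : Int) (L : Int) (citations : List Int) : Decidable (Pre_solve N L citations) := by
  unfold Pre_solve; infer_instance

def pvWitness_solve : Int × Int × List Int := (4, 1, [1, 3, 7, 3])

def Spec_solve (N : Int) (L : Int) (citations : List Int) (out : Int) : Prop := out = solve_alt N L citations
instance (N : Int) (L : Int) (citations : List Int) (out : Int) : Decidable (Spec_solve N L citations out) := by unfold Spec_solve; infer_instance

-- ===== CLAIM (what is proved, stated in full; the proofs are below) =====
def Claim_equal_solve : Prop := ∀ (N : Int) (L : Int) (citations : List Int), Dom_solve N L citations → Pre_solve N L citations → Spec_solve N L citations (solve N L citations)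

-- ===== LEMMAS AND PROOFS =====

-- citations clamped at N (what both programs effectively count)
def pvClamp (N : Int) (citations : List Int) : List Int :=
  citations.map (fun c => if c ≤ N then c else N)

-- number of clamped citations ≥ h
def pvS (N : Int) (citations : List Int) (h : Int) : Int :=
  ((pvClamp N citations).countP (fun x => h ≤ x) : Int)

-- number of clamped citations = h
def pvE (N : Int) (citations : List Int) (h : Int) : Int :=
  ((pvClamp N citations).count h : Int)

-- the common feasibility predicate (used at 1 ≤ h ≤ N)
def pvCan (N : Int) (L : Int) (citations : List Int) (h : Int) : Bool :=
  decide (pvS N citations h ≥ h ∨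
    (h - pvS N citations h ≤ L ∧ h - pvS N citations h ≤ pvE N citations (h - 1)))

lemma pv_count_split (l : List Int) (h : Int) :
    l.countP (fun x => decide (h - 1 ≤ x)) = l.countP (fun x => decide (h ≤ x)) + l.count (h - 1) := by
  induction l with
  | nil => simp
  | cons x l ih =>
    simp only [List.countP_cons, List.count_cons, ih]
    by_cases hx : x = h - 1
    · subst hx; simp; omega
    · by_cases h2 : h ≤ x <;> simp [h2, hx, show (h-1 ≤ x) ↔ (h ≤ x ∨ x = h-1) by omega] <;> omega

lemma pvS_pred (N : Int) (c : List Int) (h : Int) :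
    pvS N c (h - 1) = pvS N c h + pvE N c (h - 1) := by
  simp only [pvS, pvE, pv_count_split (pvClamp N c) h]; push_cast; ring

lemma pvE_nonneg (N : Int) (c : List Int) (h : Int) : 0 ≤ pvE N c h := by simp [pvE]

lemma pvS_top (N : Int) (c : List Int) (h : Int) (hh : N < h) : pvS N c h = 0 := by
  simp only [pvS]
  norm_cast
  rw [List.countP_eq_zero]
  intro x hx
  simp only [pvClamp, List.mem_map] at hx
  obtain ⟨a, _, rfl⟩ := hx
  by_cases hc : a ≤ N <;> simp [hc] <;> omega

lemma pvCan_step (N L : Int) (c : List Int) (h : Int)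
    (hc : pvCan N L c h = true) : pvCan N L c (h - 1) = true := by
  simp only [pvCan, decide_eq_true_eq] at hc ⊢
  have hp := pvS_pred N c h
  have he := pvE_nonneg N c (h - 1)
  left
  rcases hc with hk | ⟨_, hn⟩ <;> omega

lemma pvCan_mono (N L : Int) (c : List Int) :
    ∀ (h h' : Int), 1 ≤ h' → h' ≤ h → pvCan N L c h = true → pvCan N L c h' = true := by
  intro h h' h1 hle hc
  obtain ⟨n, hn⟩ : ∃ n : Nat, h - h' = (n : Int) := ⟨(h - h').toNat, by omega⟩
  induction n generalizing h with
  | zero =>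
    have heq : h = h' := by omega
    exact heq ▸ hc
  | succ m ih =>
    have := pvCan_step N L c h hc
    exact ih (h - 1) (by omega) this (by omega)

-- size is preserved by pvASet
lemma pv_size_set (arr : Array Int) (x v : Int) : (pvASet arr x v).size = arr.size := by
  rw [pvASet]
  split <;> split <;> simp

-- pvAGet / pvASet on an index that is in range without wrapping
lemma pvAGet_eq (arr : Array Int) (i : Int) (h0 : 0 ≤ i) (hlt : i < (arr.size : Int)) :
    pvAGet arr i = arr[i.toNat]'(by omega) := by
  rw [pvAGet]
  simp only [if_neg (show ¬ i < 0 by omega)]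
  rw [dif_pos ⟨h0, by omega⟩]

lemma pvASet_eq (arr : Array Int) (i : Int) (v : Int) (h0 : 0 ≤ i) (hlt : i < (arr.size : Int)) :
    pvASet arr i v = arr.set i.toNat v (by omega) := by
  rw [pvASet]
  simp only [if_neg (show ¬ i < 0 by omega)]
  rw [dif_pos ⟨h0, by omega⟩]

-- reading an updated array entry (all indices in range)
lemma pv_set_get (arr : Array Int) (x h : Int) (v : Int) (hx0 : 0 ≤ x)
    (hxlt : x < (arr.size : Int)) (h0 : 0 ≤ h) (hlt : h < (arr.size : Int)) :
    pvAGet (pvASet arr x v) h = if h = x then v else pvAGet arr h := by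
  rw [pvASet_eq arr x v hx0 hxlt,
      pvAGet_eq _ h h0 (by simpa using hlt),
      pvAGet_eq arr h h0 hlt, Array.getElem_set]
  by_cases hhx : h = x
  · simp [hhx]
  · rw [if_neg (by omega), if_neg hhx]

lemma pv_rep_get (n : Nat) (h : Int) : pvAGet (Array.replicate n (0 : Int)) h = 0 := by
  rw [pvAGet]
  split <;> split <;> simp

-- A's first loop: the array counts occurrences
lemma pv_freq_loop :
    ∀ (l : List Int) (arr : Array Int), (∀ x ∈ l, 0 ≤ x ∧ x < (arr.size : Int)) →
      (l.foldl (fun a x => pvASet a x (pvAGet a x + 1)) arr).size = arr.size ∧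
      ∀ h : Int, 0 ≤ h → h < (arr.size : Int) →
        pvAGet (l.foldl (fun a x => pvASet a x (pvAGet a x + 1)) arr) h
          = pvAGet arr h + (l.count h : Int) := by
  intro l
  induction l with
  | nil => intro arr _; simp
  | cons x l ih =>
    intro arr hmem
    have hx := hmem x (by simp)
    set arr' := pvASet arr x (pvAGet arr x + 1) with harr'
    have hlen' : arr'.size = arr.size := by
      rw [harr', pv_size_set]
    obtain ⟨hl, hg⟩ := ih arr' (fun y hy => by
      have := hmem y (by simp [hy]); rwa [hlen'])
    simp only [List.foldl_cons]
    refine ⟨by rw [hl, hlen'], fun h h0 hlt => ?_⟩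
    rw [hg h h0 (by rw [hlen']; exact hlt)]
    rw [harr', pv_set_get arr x h _ hx.1 hx.2 h0 hlt]
    rw [List.count_cons]
    by_cases hhx : h = x
    · simp [hhx]; omega
    · have : ¬ (x == h) := by simpa using fun e => hhx e.symm
      simp [hhx, this]

-- A's second loop: the array holds the suffix counts pvS
lemma pv_suf_loop (N : Int) (freq : Array Int) (cits : List Int)
    (hf : ∀ h : Int, 0 ≤ h → h ≤ N → pvAGet freq h = pvE N cits h) :
    ∀ (n : Nat) (a : Int) (arr : Array Int), a + 1 = (n : Int) → a ≤ N →
      (arr.size : Int) = N + 2 →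
      (∀ j : Int, a < j → j ≤ N + 1 → pvAGet arr j = pvS N cits j) →
      ∀ j : Int, 0 ≤ j → j ≤ N + 1 →
        pvAGet
          ((PySem.List.pyRange a (-1) (-1)).foldl (fun suf h =>
            pvASet suf h (pvAGet suf (h + 1) + pvAGet freq h)) arr)
          j = pvS N cits j := by
  intro n
  induction n with
  | zero =>
    intro a arr ha _ _ hinv j hj0 hjN
    rw [PySem.List.pyRange_neg_one_eq_nil (by omega)]
    exact hinv j (by omega) hjN
  | succ m ih =>
    intro a arr ha haN hlen hinv j hj0 hjN
    have ha0 : 0 ≤ a := by omega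
    rw [PySem.List.pyRange_neg_one_cons (by omega : (-1:Int) < a)]
    simp only [List.foldl_cons]
    set arr' := pvASet arr a (pvAGet arr (a + 1) + pvAGet freq a) with harr'
    have hlen' : (arr'.size : Int) = N + 2 := by
      rw [harr', pv_size_set]; exact hlen
    apply ih (a - 1) arr' (by omega) (by omega) hlen' _ j hj0 hjN
    intro k hk hkN
    rw [harr', pv_set_get arr a k _ ha0 (by omega) (by omega) (by omega)]
    by_cases hka : k = a
    · subst hka
      rw [if_pos rfl, hinv (k + 1) (by omega) (by omega), hf k (by omega) (by omega)]
      have := pvS_pred N cits (k + 1)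
      simp at this
      omega
    · rw [if_neg hka]
      exact hinv k (by omega) hkN

-- A's binary search lands on a point pinned by pvCan
lemma pv_bsearch_spec (can : Int → Bool) (N L : Int) (cits : List Int)
    (hpc : ∀ h, 1 ≤ h → h ≤ N → can h = pvCan N L cits h) :
    ∀ (fuel : Nat) (lo hi : Int), (hi - lo).toNat ≤ fuel → 0 ≤ lo → lo ≤ hi → hi ≤ N →
      (lo = 0 ∨ pvCan N L cits lo = true) → (hi = N ∨ pvCan N L cits (hi + 1) = false) →
      0 ≤ pvBsearch can fuel lo hi ∧ pvBsearch can fuel lo hi ≤ N ∧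
        (pvBsearch can fuel lo hi = 0 ∨ pvCan N L cits (pvBsearch can fuel lo hi) = true) ∧
        (pvBsearch can fuel lo hi = N ∨ pvCan N L cits (pvBsearch can fuel lo hi + 1) = false) := by
  intro fuel
  induction fuel with
  | zero =>
    intro lo hi hn h0 hle hN hlo hhi
    have : lo = hi := by omega
    subst this
    simp only [pvBsearch]
    exact ⟨h0, by omega, hlo, hhi⟩
  | succ f ih =>
    intro lo hi hn h0 hle hN hlo hhi
    rw [pvBsearch]
    by_cases hlt : lo < hi
    case neg =>
      simp only [if_neg hlt]
      have : lo = hi := by omega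
      subst this
      exact ⟨h0, by omega, hlo, hhi⟩
    case pos =>
      simp only [if_pos hlt]
      have hmid : lo < PySem.Int.floordiv (lo + hi + 1) 2 ∧ PySem.Int.floordiv (lo + hi + 1) 2 ≤ hi := by
        rw [PySem.Int.floordiv_eq_ediv_of_pos (by omega : (0:Int) < 2)]
        omega
      set mid := PySem.Int.floordiv (lo + hi + 1) 2 with hm
      by_cases hc : can mid
      case pos =>
        simp only [if_pos hc]
        have hcq : pvCan N L cits mid = true := by
          rw [← hpc mid (by omega) (by omega)]; exact hc
        exact ih mid hi (by omega) (by omega) (by omega) hN (Or.inr hcq) hhi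
      case neg =>
        simp only [if_neg hc]
        have hcq : pvCan N L cits mid = false := by
          rw [← hpc mid (by omega) (by omega)]; simpa using hc
        refine ih lo (mid - 1) (by omega) h0 (by omega) (by omega) hlo ?_
        right; simpa using hcq

-- B's scan returns the first h from the top with pvCan
lemma pv_scan_spec (N L : Int) (cits : List Int) (cnt : PySem.Dict Int Int)
    (hc : ∀ h : Int, cnt.getD h 0 = pvE N cits h) :
    ∀ (n : Nat) (a : Int), a = (n : Int) → a ≤ N →
      (∀ h : Int, a < h → h ≤ N → pvCan N L cits h = false) →
      0 ≤ pvScan L cnt (PySem.List.pyRange a 0 (-1)) (pvS N cits (a + 1)) ∧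
      pvScan L cnt (PySem.List.pyRange a 0 (-1)) (pvS N cits (a + 1)) ≤ N ∧
      (pvScan L cnt (PySem.List.pyRange a 0 (-1)) (pvS N cits (a + 1)) = 0 ∨
        pvCan N L cits (pvScan L cnt (PySem.List.pyRange a 0 (-1)) (pvS N cits (a + 1))) = true) ∧
      (∀ h : Int, pvScan L cnt (PySem.List.pyRange a 0 (-1)) (pvS N cits (a + 1)) < h → h ≤ N →
        pvCan N L cits h = false) := by
  intro n
  induction n with
  | zero =>
    intro a ha haN hinv
    rw [show a = 0 by omega, PySem.List.pyRange_neg_one_eq_nil (by omega)]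
    simp only [pvScan]
    refine ⟨by omega, by omega, by simp, fun h hh hhN => hinv h (by omega) hhN⟩
  | succ m ih =>
    intro a ha haN hinv
    have ha1 : 0 < a := by omega
    rw [PySem.List.pyRange_neg_one_cons (by omega : (0:Int) < a)]
    simp only [pvScan]
    have hsum : pvS N cits (a + 1) + cnt.getD a 0 = pvS N cits a := by
      have := pvS_pred N cits (a + 1)
      rw [hc a]
      simp at this
      omega
    rw [hsum, hc (a - 1)]
    by_cases hcond : pvS N cits a ≥ a ∨ (a - pvS N cits a ≤ L ∧ a - pvS N cits a ≤ pvE N cits (a - 1))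
    · rw [if_pos hcond]
      have : pvCan N L cits a = true := by simpa [pvCan] using hcond
      exact ⟨by omega, haN, Or.inr this, fun h hh hhN => hinv h (by omega) hhN⟩
    · rw [if_neg hcond]
      have hfa : pvCan N L cits a = false := by simpa [pvCan] using hcond
      have hstep := ih (a - 1) (by omega) (by omega) (fun h hh hhN => by
        by_cases hha : h = a
        · exact hha ▸ hfa
        · exact hinv h (by omega) hhN)
      rwa [show a - 1 + 1 = a by ring] at hstep

-- two results pinned by the same monotone predicate coincide
lemma pv_unique (N L : Int) (cits : List Int) (ra rb : Int)
    (ha0 : 0 ≤ ra) (haN : ra ≤ N) (ha1 : ra = 0 ∨ pvCan N L cits ra = true)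
    (ha2 : ra = N ∨ pvCan N L cits (ra + 1) = false)
    (hb0 : 0 ≤ rb) (hbN : rb ≤ N) (hb1 : rb = 0 ∨ pvCan N L cits rb = true)
    (hb2 : ∀ h : Int, rb < h → h ≤ N → pvCan N L cits h = false) : ra = rb := by
  rcases lt_trichotomy ra rb with hlt | heq | hgt
  · rcases hb1 with rfl | hcb
    · omega
    rcases ha2 with rfl | hca
    · omega
    have := pvCan_mono N L cits rb (ra + 1) (by omega) (by omega) hcb
    rw [this] at hca; exact absurd hca (by simp)
  · exact heq
  · rcases ha1 with rfl | hca
    · omega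
    have := hb2 ra (by omega) haN
    rw [hca] at this; exact absurd this (by simp)

-- proof-side names for the let-bound pieces of the two ports (definitionally equal)
def pvFREQ (N : Int) (cits : List Int) : Array Int :=
  cits.foldl (fun freq c =>
      let i := if c ≤ N then c else N
      pvASet freq i (pvAGet freq i + 1))
    (Array.replicate (N + 1).toNat (0 : Int))

def pvSUF (N : Int) (cits : List Int) : Array Int :=
  (PySem.List.pyRange N (-1) (-1)).foldl (fun suf h =>
      pvASet suf h (pvAGet suf (h + 1) + pvAGet (pvFREQ N cits) h))
    (Array.replicate (N + 2).toNat (0 : Int))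

def pvCANF (N L : Int) (cits : List Int) : Int → Bool := fun h =>
  let k := pvAGet (pvSUF N cits) h
  if k ≥ h then true
  else
    let need := h - k
    let t := if h ≥ 1 then pvAGet (pvFREQ N cits) (h - 1) else 0
    decide (need ≤ L ∧ need ≤ t)

lemma pv_solve_eq (N L : Int) (cits : List Int) :
    solve N L cits = pvBsearch (pvCANF N L cits) ((N - 0).toNat + 1) 0 N := rfl

lemma pv_alt_eq (N L : Int) (cits : List Int) :
    solve_alt N L cits
      = pvScan L (PySem.Dict.counter (cits.map (fun c => if c ≤ N then c else N)))
          (PySem.List.pyRange N 0 (-1)) 0 := rfl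

-- ===== VERDICT (by name: the statement is the Claim_ definition above) =====
theorem solve_spec : Claim_equal_solve := by
  intro N L cits _ hpre
  unfold Spec_solve
  obtain ⟨hN0, hcpos⟩ := hpre
  by_cases hN : 0 ≤ N
  case neg =>
    -- N < 0: Pre_ forces citations = []; both programs return 0
    have hnil : cits = [] := by tauto
    subst hnil
    rw [pv_solve_eq, pv_alt_eq, PySem.List.pyRange_neg_one_eq_nil (by omega)]
    simp [pvBsearch, show ¬ (0 < N) by omega, pvScan]
  case pos =>
    -- clamped citations lie in [0, N]
    have hclamp : ∀ x ∈ pvClamp N cits, 0 ≤ x ∧ x ≤ N := by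
      intro x hx
      simp only [pvClamp, List.mem_map] at hx
      obtain ⟨c, hc, rfl⟩ := hx
      have := hcpos c hc
      by_cases hcn : c ≤ N <;> simp [hcn] <;> omega
    have hfold : pvFREQ N cits
        = (pvClamp N cits).foldl (fun a x => pvASet a x (pvAGet a x + 1))
          (Array.replicate (N + 1).toNat (0 : Int)) := by
      rw [pvFREQ, pvClamp, List.foldl_map]
    have hreplen : (((Array.replicate (N + 1).toNat (0 : Int)).size) : Int) = N + 1 := by
      simp; omega
    obtain ⟨hflen, hfget⟩ := pv_freq_loop (pvClamp N cits) (Array.replicate (N + 1).toNat 0)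
      (fun x hx => ⟨(hclamp x hx).1, by rw [hreplen]; have := (hclamp x hx).2; omega⟩)
    have hfreq : ∀ h : Int, 0 ≤ h → h ≤ N → pvAGet (pvFREQ N cits) h = pvE N cits h := by
      intro h h0 hN'
      rw [hfold, hfget h h0 (by rw [hreplen]; omega), pv_rep_get]
      simp [pvE]
    have hsuf : ∀ j : Int, 0 ≤ j → j ≤ N + 1 → pvAGet (pvSUF N cits) j = pvS N cits j := by
      intro j hj0 hjN
      rw [pvSUF]
      exact pv_suf_loop N (pvFREQ N cits) cits hfreq (N + 1).toNat N (Array.replicate (N + 2).toNat 0)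
        (by omega) (le_refl N) (by simp; omega)
        (fun j hj hjN => by
          rw [pv_rep_get, show j = N + 1 by omega, pvS_top N cits (N + 1) (by omega)])
        j hj0 hjN
    -- A's can agrees with pvCan on [1, N]
    have hcan : ∀ h : Int, 1 ≤ h → h ≤ N → pvCANF N L cits h = pvCan N L cits h := by
      intro h h1 hN'
      rw [pvCANF]
      simp only [hsuf h (by omega) (by omega), if_pos (show h ≥ 1 by omega),
        hfreq (h - 1) (by omega) (by omega), pvCan]
      by_cases hk : pvS N cits h ≥ h
      · simp [hk]
      · simp [hk]
    have hA := pv_bsearch_spec _ N L cits hcan ((N - 0).toNat + 1) 0 N (by omega) (le_refl 0) hN (le_refl N)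
      (Or.inl rfl) (Or.inl rfl)
    have hcnt : ∀ h : Int,
        (PySem.Dict.counter (cits.map (fun c => if c ≤ N then c else N))).getD h 0 = pvE N cits h := by
      intro h
      rw [PySem.Dict.getD_counter]
      simp [pvE, pvClamp]
    have hB := pv_scan_spec N L cits _ hcnt N.toNat N (by omega) (le_refl N)
      (fun h hh hhN => by omega)
    rw [pvS_top N cits (N + 1) (by omega)] at hB
    rw [pv_solve_eq, pv_alt_eq]
    exact pv_unique N L cits _ _ hA.1 hA.2.1 hA.2.2.1 hA.2.2.2 hB.1 hB.2.1 hB.2.2.1 hB.2.2.2
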